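-- pv_equiv track=rewrite | github.com/nahowo/Algorithm-study | 프로그래머스/1/92334. 신고 결과 받기/신고 결과 받기.py | solution
-- ===== SOURCE A (Python) =====
-- def solution(id_list, report, k):
--     count={i:0 for i in id_list} # 신고자: 신고한 이용자 중 정지된 이용자 수
--     record={i:set() for i in id_list} # 신고된 이용자: {신고한 이용자 1, 신고한 이용자 2, ...}
--     for i in range(len(report)): # record 기록 작성
--         reporter,reported=report[i].split()
--         record[reported].add(reporter)
--
--     for reported,reporters in record.items(): # 신고 횟수 확인
--         if len(reporters)>=k:
--             for j in list(reporters):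
--                 count[j]+=1
--     answer=list(count.values())
--
--     return answer
-- ===== SOURCE B (Python) =====
-- def solution(id_list, report, k):
--     # deduplicate reports into (reporter, reported) pairs, first occurrences in order
--     pairs = list(dict.fromkeys(tuple(r.split()) for r in report))
--     times = {}
--     for _, reported in pairs:
--         times[reported] = times.get(reported, 0) + 1
--     banned = {u for u, c in times.items() if c >= k}
--     return [sum(1 for rep, red in pairs if rep == i and red in banned)
--             for i in dict.fromkeys(id_list)]
-- ===== Notes on version B (the rewrite author's own statement) =====
-- stated objective: alternative
-- what changed: B replaces A's per-user dict of reporter sets and nested ban-then-increment loops by one deduplicated (reporter, reported) pair list consumed by flat passes: a per-reported counter, a banned set, and a per-id count over the pairs.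
-- outside the precondition, e.g. on solution(['a'], ['b a'], 2): A returns [0], B returns [0]
import Mathlib
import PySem

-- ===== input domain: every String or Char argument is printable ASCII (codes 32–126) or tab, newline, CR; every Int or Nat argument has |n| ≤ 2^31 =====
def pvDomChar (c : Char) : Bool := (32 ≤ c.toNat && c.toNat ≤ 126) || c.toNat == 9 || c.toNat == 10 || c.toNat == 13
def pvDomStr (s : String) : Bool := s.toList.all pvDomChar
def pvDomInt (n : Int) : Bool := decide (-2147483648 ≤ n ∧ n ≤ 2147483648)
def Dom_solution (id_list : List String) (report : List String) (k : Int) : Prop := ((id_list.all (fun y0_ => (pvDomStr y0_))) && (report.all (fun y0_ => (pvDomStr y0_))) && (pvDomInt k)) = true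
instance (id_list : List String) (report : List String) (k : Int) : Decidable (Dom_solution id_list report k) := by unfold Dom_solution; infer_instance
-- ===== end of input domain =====

-- B replaces A's per-user reporter-set dict and nested ban loop by one deduplicated
-- (reporter, reported) pair list consumed by flat counting passes (objective: alternative).

-- ===== PORT A =====
-- 'reporter,reported = report[i].split(); record[reported].add(reporter)'.
-- A raises ValueError (≠ 2 tokens) / KeyError (unknown reported) on the '_' branch /
-- an absent key: those inputs are outside Pre_solution, the port leaves the dict unchanged there.
def pvAddRecord (r : PySem.Dict String (PySem.Set String)) (s : String) :
    PySem.Dict String (PySem.Set String) :=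
  match PySem.Str.split₀ s with
  | [reporter, reported] =>
      r.modify reported PySem.Set.empty (fun st => PySem.Set.add st reporter)
  | _ => r

def solution (id_list : List String) (report : List String) (k : Int) : List Int :=
  let count := id_list.foldl (fun d i => d.insert i (0 : Int)) PySem.Dict.empty
  let record := id_list.foldl
    (fun d i => d.insert i (PySem.Set.empty : PySem.Set String)) PySem.Dict.empty
  let record := report.foldl pvAddRecord record
  -- for reported, reporters in record.items(): if len(reporters) >= k: for j in reporters: count[j] += 1
  -- (the final per-key counts do not depend on the set's iteration order)
  let count := record.items.foldl
    (fun c p =>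
      if k ≤ PySem.Set.len p.2 then
        p.2.foldl (fun c j => c.modify j 0 (· + 1)) c
      else c)
    count
  count.values

-- ===== PORT B =====
-- tuple(r.split()); the '_' branch (≠ 2 tokens) is unreachable under Pre_solution
def pvSplitPair (r : String) : String × String :=
  match PySem.Str.split₀ r with
  | [a, b] => (a, b)
  | _ => ("", "")

def solution_alt (id_list : List String) (report : List String) (k : Int) : List Int :=
  -- pairs = list(dict.fromkeys(tuple(r.split()) for r in report))
  let pairs := PySem.List.dedup (report.map pvSplitPair)
  -- times[reported] = times.get(reported, 0) + 1
  let times := pairs.foldl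
    (fun d p => d.insert p.2 (d.getD p.2 0 + 1)) (PySem.Dict.empty : PySem.Dict String Int)
  -- banned = {u for u, c in times.items() if c >= k}
  let banned := PySem.Set.ofList ((times.items.filter (fun q => decide (k ≤ q.2))).map Prod.fst)
  -- [sum(1 for rep, red in pairs if rep == i and red in banned) for i in dict.fromkeys(id_list)]
  (PySem.List.dedup id_list).map
    (fun i => ((pairs.countP (fun p => p.1 == i && banned.contains p.2) : Nat) : Int))

-- ===== PRECONDITION & SPEC =====
-- Pre_solution: every report splits into exactly two tokens, both in id_list. Otherwise A
-- raises ValueError (unpacking) or KeyError (unknown reported always; unknown reporter when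
-- the reported user ends up banned). Pre_ is slightly narrower than A's return domain: it
-- also excludes reports by an unknown reporter against a user who is never banned, where
-- A happens to return because the conditional count[j] += 1 is skipped.
def Pre_solution (id_list : List String) (report : List String) (k : Int) : Prop :=
  (report.all (fun r =>
    match PySem.Str.split₀ r with
    | [a, b] => id_list.contains a && id_list.contains b
    | _ => false)) = true

instance (id_list : List String) (report : List String) (k : Int) :
    Decidable (Pre_solution id_list report k) := by unfold Pre_solution; infer_instance

def pvWitness_solution : List String × List String × Int :=
  (["muzi", "frodo"], ["muzi frodo", "frodo muzi", "muzi frodo"], 1)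

def Spec_solution (id_list : List String) (report : List String) (k : Int) (out : List Int) : Prop :=
  out = solution_alt id_list report k
instance (id_list : List String) (report : List String) (k : Int) (out : List Int) :
    Decidable (Spec_solution id_list report k out) := by unfold Spec_solution; infer_instance

-- ===== CLAIM (what is proved, stated in full; the proofs are below) =====
def Claim_equal_solution : Prop :=
  ∀ (id_list : List String) (report : List String) (k : Int),
    Dom_solution id_list report k → Pre_solution id_list report k →
      Spec_solution id_list report k (solution id_list report k)

-- ===== LEMMAS AND PROOFS =====

-- the set of (distinct) reporters of user u, as A's record[u] ends up holding it
def pvS (report : List String) (u : String) : PySem.Set String :=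
  PySem.Set.ofList (((report.map pvSplitPair).filter (fun p => p.2 == u)).map Prod.fst)

lemma pv_len_nodup_eq {α : Type} {l l' : List α} (hl : l.Nodup) (hl' : l'.Nodup)
    (h : ∀ a, a ∈ l ↔ a ∈ l') : l.length = l'.length :=
  ((List.perm_ext_iff_of_nodup hl hl').2 h).length_eq

lemma pv_pre_split {id_list report : List String} {k : Int}
    (h : Pre_solution id_list report k) {r : String} (hr : r ∈ report) :
    PySem.Str.split₀ r = [(pvSplitPair r).1, (pvSplitPair r).2] ∧
      (pvSplitPair r).1 ∈ id_list ∧ (pvSplitPair r).2 ∈ id_list := by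
  unfold Pre_solution at h
  rw [List.all_eq_true] at h
  have hb := h r hr
  rcases hsp : PySem.Str.split₀ r with _ | ⟨a, _ | ⟨b, _ | ⟨c, tl⟩⟩⟩ <;> rw [hsp] at hb
  · exact Bool.noConfusion hb
  · exact Bool.noConfusion hb
  · have hb' : (id_list.contains a && id_list.contains b) = true := hb
    rw [Bool.and_eq_true] at hb'
    have hpv : pvSplitPair r = (a, b) := by unfold pvSplitPair; rw [hsp]
    have h1 : a ∈ id_list := by have := hb'.1; simp at this; exact this
    have h2 : b ∈ id_list := by have := hb'.2; simp at this; exact this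
    rw [hpv]
    exact ⟨rfl, h1, h2⟩
  · exact Bool.noConfusion hb

lemma pv_mem_pairs {id_list report : List String} {k : Int}
    (h : Pre_solution id_list report k) {p : String × String}
    (hp : p ∈ report.map pvSplitPair) : p.1 ∈ id_list ∧ p.2 ∈ id_list := by
  rcases List.mem_map.1 hp with ⟨r, hr, rfl⟩
  exact (pv_pre_split h hr).2

lemma pv_getD_zero (l : List String) (d : PySem.Dict String Int)
    (h : ∀ x, d.getD x 0 = 0) (x : String) :
    (l.foldl (fun d i => d.insert i (0 : Int)) d).getD x 0 = 0 := by
  induction l generalizing d with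
  | nil => simpa using h x
  | cons a l ih =>
    simp only [List.foldl_cons]
    refine ih _ (fun y => ?_)
    by_cases hy : y = a
    · subst hy; rw [PySem.Dict.getD_insert_self]
    · rw [PySem.Dict.getD_insert_of_ne _ _ _ hy]; exact h y

lemma pv_getD_emptyset (l : List String) (d : PySem.Dict String (PySem.Set String))
    (h : ∀ x, d.getD x PySem.Set.empty = PySem.Set.empty) (x : String) :
    (l.foldl (fun d i => d.insert i (PySem.Set.empty : PySem.Set String)) d).getD x
        PySem.Set.empty = PySem.Set.empty := by
  induction l generalizing d with
  | nil => simpa using h x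
  | cons a l ih =>
    simp only [List.foldl_cons]
    refine ih _ (fun y => ?_)
    by_cases hy : y = a
    · subst hy; rw [PySem.Dict.getD_insert_self]
    · rw [PySem.Dict.getD_insert_of_ne _ _ _ hy]; exact h y

lemma pv_update_self {s : PySem.Set String} {xs : List String}
    (hxs : ∀ x ∈ xs, x ∈ s) : PySem.Set.update s xs = s := by
  rw [PySem.Set.update_eq_append_filter]
  have hnil : List.filter (fun y => !s.contains y) (PySem.Set.ofList xs) = [] := by
    rw [List.filter_eq_nil_iff]
    intro a ha
    have hmem : a ∈ s := hxs a ((PySem.Set.mem_ofList _ _).1 ha)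
    simp [hmem]
  rw [hnil, List.append_nil]

lemma pv_Aloop {id_list report : List String} {k : Int} (h : Pre_solution id_list report k)
    (r0 : PySem.Dict String (PySem.Set String)) :
    report.foldl pvAddRecord r0
      = (report.map pvSplitPair).foldl
          (fun r p => r.modify p.2 PySem.Set.empty (fun st => PySem.Set.add st p.1)) r0 := by
  rw [List.foldl_map]
  refine PySem.List.foldl_congr_mem _ _ _ _ (fun acc r hr => ?_)
  obtain ⟨hsp, -, -⟩ := pv_pre_split h hr
  unfold pvAddRecord
  rw [hsp]

lemma pv_record_getD (qs : List (String × String)) (r : PySem.Dict String (PySem.Set String))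
    (u : String) :
    (qs.foldl (fun r p => r.modify p.2 PySem.Set.empty (fun st => PySem.Set.add st p.1)) r).getD
        u PySem.Set.empty
      = PySem.Set.update (r.getD u PySem.Set.empty)
          ((qs.filter (fun p => p.2 == u)).map Prod.fst) := by
  induction qs generalizing r with
  | nil => simp [PySem.Set.update_nil]
  | cons p qs ih =>
    rcases p with ⟨a, b⟩
    simp only [List.foldl_cons]
    rw [ih, PySem.Dict.getD_modify]
    by_cases hpu : b = u
    · subst hpu
      simp [PySem.Set.update_cons]
    · simp [hpu, Ne.symm hpu]

lemma pv_keys_loop (k : Int) (S : String → PySem.Set String) (us : List String)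
    (c : PySem.Dict String Int) (h : ∀ u ∈ us, ∀ j ∈ S u, j ∈ c.keys) :
    ((us.map (fun u => (u, S u))).foldl
      (fun c p =>
        if k ≤ PySem.Set.len p.2 then p.2.foldl (fun c j => c.modify j 0 (· + 1)) c else c)
      c).keys = c.keys := by
  induction us generalizing c with
  | nil => rfl
  | cons u us ih =>
    simp only [List.map_cons, List.foldl_cons]
    by_cases hk : k ≤ PySem.Set.len (S u)
    · rw [if_pos hk]
      have hkeys : ((S u).foldl (fun c j => c.modify j 0 (· + 1)) c).keys = c.keys := by
        rw [PySem.Dict.keys_foldl_modify]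
        exact pv_update_self (fun j hj => h u List.mem_cons_self j hj)
      rw [ih _ (fun v hv j hj => by rw [hkeys]; exact h v (List.mem_cons_of_mem _ hv) j hj),
        hkeys]
    · rw [if_neg hk]
      exact ih _ (fun v hv j hj => h v (List.mem_cons_of_mem _ hv) j hj)

lemma pv_getD_loop (k : Int) (S : String → PySem.Set String) (us : List String)
    (c : PySem.Dict String Int) (i : String) :
    ((us.map (fun u => (u, S u))).foldl
      (fun c p =>
        if k ≤ PySem.Set.len p.2 then p.2.foldl (fun c j => c.modify j 0 (· + 1)) c else c)
      c).getD i 0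
    = c.getD i 0 +
        ((us.filter (fun u => decide (k ≤ PySem.Set.len (S u)))).map
          (fun u => (List.count i (S u) : Int))).sum := by
  induction us generalizing c with
  | nil => simp
  | cons u us ih =>
    simp only [List.map_cons, List.foldl_cons, List.filter_cons]
    by_cases hk : k ≤ PySem.Set.len (S u)
    · rw [if_pos hk, ih, PySem.Dict.getD_foldl_modify_add_one,
        if_pos (decide_eq_true hk)]
      simp only [List.map_cons, List.sum_cons]
      ring
    · rw [if_neg hk, ih,
        if_neg (fun hdec => hk (of_decide_eq_true hdec))]

lemma pv_sum_count (l : List String) (p : String → Bool) (S : String → PySem.Set String)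
    (hf : ∀ u ∈ l, (S u).Nodup) (i : String) :
    ((l.filter p).map (fun u => (List.count i (S u) : Int))).sum
      = (l.countP (fun u => p u && decide (i ∈ S u)) : Int) := by
  induction l with
  | nil => simp
  | cons u l ih =>
    have hrest := ih (fun v hv => hf v (List.mem_cons_of_mem _ hv))
    simp only [List.filter_cons, List.countP_cons]
    by_cases hp : p u = true
    · by_cases hm : i ∈ S u
      · have h1 : List.count i (S u) = 1 :=
          List.count_eq_one_of_mem (hf u List.mem_cons_self) hm
        simp only [hp, if_pos, List.map_cons, List.sum_cons, h1, hrest]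
        simp [hm]
        omega
      · have h0 : List.count i (S u) = 0 := List.count_eq_zero_of_not_mem hm
        simp only [hp, if_pos, List.map_cons, List.sum_cons, h0, hrest]
        simp [hm]
    · simp [hp, hrest]

lemma pv_mem_banned (xs : List String) (k : Int) (u : String) :
    u ∈ PySem.Set.ofList
        (((PySem.Dict.counter xs).items.filter (fun q => decide (k ≤ q.2))).map Prod.fst)
      ↔ u ∈ xs ∧ k ≤ (List.count u xs : Int) := by
  rw [PySem.Dict.items_counter, PySem.Set.mem_ofList]
  constructor
  · intro hu
    rcases List.mem_map.1 hu with ⟨q, hq, rfl⟩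
    rcases List.mem_filter.1 hq with ⟨hq1, hq2⟩
    rcases List.mem_map.1 hq1 with ⟨v, hv, rfl⟩
    exact ⟨(PySem.Set.mem_ofList _ _).1 hv, by simpa using hq2⟩
  · rintro ⟨h1, h2⟩
    refine List.mem_map.2 ⟨(u, (List.count u xs : Int)), List.mem_filter.2 ⟨?_, ?_⟩, rfl⟩
    · exact List.mem_map.2 ⟨u, (PySem.Set.mem_ofList _ _).2 h1, rfl⟩
    · simpa using h2

lemma pv_mem_S (report : List String) (u a : String) :
    a ∈ pvS report u ↔ (a, u) ∈ report.map pvSplitPair := by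
  unfold pvS
  rw [PySem.Set.mem_ofList]
  constructor
  · intro ha
    rcases List.mem_map.1 ha with ⟨q, hq, rfl⟩
    rcases List.mem_filter.1 hq with ⟨hq1, hq2⟩
    have hq2' : q.2 = u := by simpa using hq2
    have : q = (q.1, u) := by rw [← hq2']
    exact this ▸ hq1
  · intro hmem
    exact List.mem_map.2 ⟨(a, u), List.mem_filter.2 ⟨hmem, by simp⟩, rfl⟩

lemma pv_main_count (id_list report : List String) (k : Int) (i : String)
    (hmem : ∀ p ∈ report.map pvSplitPair, p.1 ∈ id_list ∧ p.2 ∈ id_list) :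
    (PySem.List.dedup id_list).countP
        (fun u => decide (k ≤ PySem.Set.len (pvS report u)) && decide (i ∈ pvS report u))
    = (PySem.List.dedup (report.map pvSplitPair)).countP
        (fun p => p.1 == i &&
          (PySem.Set.ofList
            (((PySem.Dict.counter
                ((PySem.List.dedup (report.map pvSplitPair)).map Prod.snd)).items.filter
              (fun q => decide (k ≤ q.2))).map Prod.fst)).contains p.2) := by
  classical
  set ps := report.map pvSplitPair with hps
  set pairs := PySem.List.dedup ps with hpairs
  set seconds := pairs.map Prod.snd with hseconds
  have hnp : pairs.Nodup := PySem.List.nodup_dedup ps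
  have hmemd : ∀ q : String × String, q ∈ pairs ↔ q ∈ ps := fun q => PySem.List.mem_dedup ps q
  have hSmem : ∀ u a, a ∈ pvS report u ↔ (a, u) ∈ pairs := by
    intro u a
    rw [pv_mem_S]
    exact (hmemd _).symm
  have hSnodup : ∀ u, (pvS report u).Nodup := fun u => PySem.Set.nodup_ofList _
  have hlenS : ∀ u, (pvS report u).length = List.count u seconds := by
    intro u
    have h1 : List.count u seconds = (pairs.filter (fun p => p.2 == u)).length := by
      rw [hseconds, List.count_eq_countP, List.countP_map, List.countP_eq_length_filter]
      rfl
    have h2 : ((pairs.filter (fun p => p.2 == u)).map Prod.fst).Nodup := by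
      refine List.Nodup.map_on ?_ (hnp.filter _)
      intro x hx y hy hxy
      have hx2 : x.2 = u := by simpa using (List.mem_filter.1 hx).2
      have hy2 : y.2 = u := by simpa using (List.mem_filter.1 hy).2
      exact Prod.ext hxy (hx2.trans hy2.symm)
    have h3 : ∀ a, a ∈ pvS report u ↔ a ∈ (pairs.filter (fun p => p.2 == u)).map Prod.fst := by
      intro a
      rw [hSmem]
      constructor
      · intro hp
        exact List.mem_map.2 ⟨(a, u), List.mem_filter.2 ⟨hp, by simp⟩, rfl⟩
      · intro ha
        rcases List.mem_map.1 ha with ⟨q, hq, rfl⟩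
        rcases List.mem_filter.1 hq with ⟨hq1, hq2⟩
        have hq2' : q.2 = u := by simpa using hq2
        have : q = (q.1, u) := by rw [← hq2']
        exact this ▸ hq1
    rw [pv_len_nodup_eq (hSnodup u) h2 h3, List.length_map, h1]
  have hbanned : ∀ u,
      ((PySem.Set.ofList
        (((PySem.Dict.counter seconds).items.filter (fun q => decide (k ≤ q.2))).map
          Prod.fst)).contains u = true) ↔ u ∈ seconds ∧ k ≤ (List.count u seconds : Int) := by
    intro u
    rw [PySem.Set.contains_iff]
    exact pv_mem_banned seconds k u
  rw [List.countP_eq_length_filter, List.countP_eq_length_filter]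
  conv_rhs => rw [← List.length_map Prod.snd]
  refine pv_len_nodup_eq ((PySem.List.nodup_dedup id_list).filter _) ?_ ?_
  · refine List.Nodup.map_on ?_ (hnp.filter _)
    intro x hx y hy hxy
    have hx1 : x.1 = i := by
      have := (List.mem_filter.1 hx).2
      rw [Bool.and_eq_true] at this
      simpa using this.1
    have hy1 : y.1 = i := by
      have := (List.mem_filter.1 hy).2
      rw [Bool.and_eq_true] at this
      simpa using this.1
    exact Prod.ext (hx1.trans hy1.symm) hxy
  · intro u
    constructor
    · intro hu
      rcases List.mem_filter.1 hu with ⟨hud, hq⟩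
      rw [Bool.and_eq_true, decide_eq_true_eq, decide_eq_true_eq] at hq
      obtain ⟨hk, hi⟩ := hq
      have hip : (i, u) ∈ pairs := (hSmem u i).1 hi
      have husec : u ∈ seconds := by
        rw [hseconds]
        exact List.mem_map.2 ⟨(i, u), hip, rfl⟩
      have hkc : k ≤ (List.count u seconds : Int) := by
        have hl := hlenS u
        have hlen : PySem.Set.len (pvS report u) = ((pvS report u).length : Int) := by
          simp [PySem.Set.len]
        omega
      refine List.mem_map.2 ⟨(i, u), List.mem_filter.2 ⟨hip, ?_⟩, rfl⟩
      rw [Bool.and_eq_true]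
      exact ⟨by simp, (hbanned u).2 ⟨husec, hkc⟩⟩
    · intro hu
      rcases List.mem_map.1 hu with ⟨p, hpf, rfl⟩
      rcases List.mem_filter.1 hpf with ⟨hpp, hq⟩
      rw [Bool.and_eq_true] at hq
      obtain ⟨h1, h2⟩ := hq
      have hp1 : p.1 = i := by simpa using h1
      have hb := (hbanned p.2).1 h2
      have hip : (i, p.2) ∈ pairs := by
        have hpe : p = (i, p.2) := by rw [← hp1]
        exact hpe ▸ hpp
      refine List.mem_filter.2 ⟨?_, ?_⟩
      · rw [PySem.List.mem_dedup]
        exact (hmem _ ((hmemd p).1 hpp)).2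
      · rw [Bool.and_eq_true, decide_eq_true_eq, decide_eq_true_eq]
        refine ⟨?_, (hSmem p.2 i).2 hip⟩
        have hl := hlenS p.2
        have hlen : PySem.Set.len (pvS report p.2) = ((pvS report p.2).length : Int) := by
          simp [PySem.Set.len]
        have hcnt := hb.2
        omega

-- ===== VERDICT (by name: the statement is the Claim_ definition above) =====
theorem solution_spec : Claim_equal_solution := by
  intro id_list report k hdom hpre
  unfold Spec_solution solution solution_alt
  dsimp only
  have hmemps : ∀ p ∈ report.map pvSplitPair, p.1 ∈ id_list ∧ p.2 ∈ id_list :=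
    fun p hp => pv_mem_pairs hpre hp
  rw [pv_Aloop hpre]
  set r0 := id_list.foldl
    (fun d i => d.insert i (PySem.Set.empty : PySem.Set String)) PySem.Dict.empty with hr0
  set rec := (report.map pvSplitPair).foldl
    (fun r p => r.modify p.2 PySem.Set.empty (fun st => PySem.Set.add st p.1)) r0 with hrec
  have hr0get : ∀ u, r0.getD u PySem.Set.empty = PySem.Set.empty :=
    fun u => pv_getD_emptyset _ _ (fun x => PySem.Dict.getD_empty x _) u
  have hrecget : ∀ u, rec.getD u PySem.Set.empty = pvS report u := by
    intro u
    rw [hrec, pv_record_getD, hr0get, PySem.Set.update_empty]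
    rfl
  have hr0keys : r0.keys = PySem.Set.ofList id_list := by
    rw [hr0, PySem.Dict.keys_foldl_insert, PySem.Dict.keys_empty, PySem.Set.update_nil_left]
  have hreckeys : rec.keys = PySem.Set.ofList id_list := by
    rw [hrec, PySem.Dict.keys_foldl_modify_key (key := Prod.snd), hr0keys]
    refine pv_update_self ?_
    intro x hx
    rcases List.mem_map.1 hx with ⟨p, hp, rfl⟩
    exact (PySem.Set.mem_ofList _ _).2 (hmemps p hp).2
  have hrecnodup : rec.keys.Nodup := hreckeys ▸ PySem.Set.nodup_ofList _
  have hitems : rec.items = (PySem.Set.ofList id_list).map (fun u => (u, pvS report u)) := by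
    rw [PySem.Dict.items_eq_map_keys rec hrecnodup PySem.Set.empty, hreckeys]
    exact List.map_congr_left (fun u _ => by rw [hrecget])
  rw [hitems]
  set c0 := id_list.foldl (fun d i => d.insert i (0 : Int)) PySem.Dict.empty with hc0
  have hc0get : ∀ x, c0.getD x 0 = 0 :=
    fun x => pv_getD_zero _ _ (fun y => PySem.Dict.getD_empty y 0) x
  have hc0keys : c0.keys = PySem.Set.ofList id_list := by
    rw [hc0, PySem.Dict.keys_foldl_insert, PySem.Dict.keys_empty, PySem.Set.update_nil_left]
  set cF := ((PySem.Set.ofList id_list).map (fun u => (u, pvS report u))).foldl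
    (fun c p =>
      if k ≤ PySem.Set.len p.2 then p.2.foldl (fun c j => c.modify j 0 (· + 1)) c else c)
    c0 with hcF
  have hcFkeys : cF.keys = PySem.Set.ofList id_list := by
    rw [hcF, pv_keys_loop, hc0keys]
    intro u _ j hj
    rw [hc0keys]
    have hjm : (j, u) ∈ report.map pvSplitPair := (pv_mem_S report u j).1 hj
    exact (PySem.Set.mem_ofList _ _).2 (hmemps _ hjm).1
  have hvals : cF.values = (PySem.Set.ofList id_list).map (fun i => cF.getD i 0) := by
    rw [PySem.Dict.values_eq_map_keys cF (hcFkeys ▸ PySem.Set.nodup_ofList _) 0, hcFkeys]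
  rw [hvals]
  have htimes : (PySem.List.dedup (report.map pvSplitPair)).foldl
      (fun d p => d.insert p.2 (d.getD p.2 0 + 1)) PySem.Dict.empty
      = PySem.Dict.counter ((PySem.List.dedup (report.map pvSplitPair)).map Prod.snd) := by
    rw [← PySem.Dict.foldl_insert_getD_add_one_eq_counter, List.foldl_map]
  rw [htimes, PySem.List.dedup_eq_ofList id_list]
  refine List.map_congr_left (fun i _ => ?_)
  rw [hcF, pv_getD_loop, hc0get,
    pv_sum_count _ _ (pvS report) (fun u _ => PySem.Set.nodup_ofList _) i, zero_add]
  have hmain := pv_main_count id_list report k i hmemps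
  rw [PySem.List.dedup_eq_ofList id_list] at hmain
  exact_mod_cast hmain
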